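-- pv_equiv track=rewrite | github.com/atvKail/solve | SolutionsOnSites/Codeforces/Educational Codeforces Round 177 (Rated for Div. 2)/E.py | cntLeq
-- ===== SOURCE A (Python) =====
-- def conv(x, coins_desc):
--     digits = []
--     for coin in coins_desc:
--         if coin > x:
--             d = 0
--         else:
--             d = x // coin
--             if d > 4:
--                 d = 4
--         digits.append(d)
--         x -= d * coin
--     return digits
--
-- def cntLeq(X, target, coins_desc):
--     rep = conv(X, coins_desc)
--     n = len(rep)
--
--     dp = [[[0] * (target + 1) for _ in range(2)] for _ in range(n + 1)]
--
--     dp[0][1][0] = 1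
--     for i in range(n):
--         for tight in range(2):
--             for s in range(target + 1):
--                 ways = dp[i][tight][s]
--                 if ways == 0:
--                     continue
--
--                 max_digit = rep[i] if tight == 1 else 4
--                 for d in range(max_digit + 1):
--                     ns = s + d
--                     if ns > target:
--                         continue
--                     ntight = 1 if (tight == 1 and d == rep[i]) else 0
--                     dp[i + 1][ntight][ns] += ways
--     return dp[n][0][target] + dp[n][1][target]
-- ===== SOURCE B (Python) =====
-- def cntLeq(X, target, coins_desc):
--     # greedy mixed-base representation of X, each digit capped at 4
--     rep = []
--     x = X
--     for coin in coins_desc: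
--         d = min(x // coin, 4) if coin <= x else 0
--         rep.append(d)
--         x -= d * coin
--     # rolling 1-D count of strictly-smaller prefixes + a scalar tight state:
--     # f[s] = number of digit strings over positions seen so far, each digit 0..4,
--     #        lexicographically below rep's prefix, with digit sum s;
--     # ok/ps = whether the exact prefix of rep is still a candidate, and its digit sum.
--     f = [0] * (target + 1)
--     ps = 0
--     ok = True
--     for r in rep:
--         nf = [0] * (target + 1)
--         for s in range(target + 1):
--             acc = 0
--             for d in range(min(4, s) + 1):
--                 acc += f[s - d]
--             nf[s] = acc
--         if ok:
--             for d in range(r):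
--                 if ps + d <= target:
--                     nf[ps + d] += 1
--         f = nf
--         ok = ok and 0 <= r and ps + r <= target
--         ps += r
--     res = f[target]
--     if ok and ps == target:
--         res += 1
--     return res
-- ===== Notes on version B (the rewrite author's own statement) =====
-- stated objective: alternative
-- what changed: Replaces A's (n+1) x 2 x (target+1) push-style digit DP table with a single rolling 1-D array of strictly-below-prefix counts updated by a pull-style window-of-5 sum, plus a scalar (prefix-sum, still-tight) state replacing the whole tight plane of the table.
-- outside the precondition, e.g. on cntLeq(-5, 0, [0]): A returns 1, B returns 1
import Mathlib
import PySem

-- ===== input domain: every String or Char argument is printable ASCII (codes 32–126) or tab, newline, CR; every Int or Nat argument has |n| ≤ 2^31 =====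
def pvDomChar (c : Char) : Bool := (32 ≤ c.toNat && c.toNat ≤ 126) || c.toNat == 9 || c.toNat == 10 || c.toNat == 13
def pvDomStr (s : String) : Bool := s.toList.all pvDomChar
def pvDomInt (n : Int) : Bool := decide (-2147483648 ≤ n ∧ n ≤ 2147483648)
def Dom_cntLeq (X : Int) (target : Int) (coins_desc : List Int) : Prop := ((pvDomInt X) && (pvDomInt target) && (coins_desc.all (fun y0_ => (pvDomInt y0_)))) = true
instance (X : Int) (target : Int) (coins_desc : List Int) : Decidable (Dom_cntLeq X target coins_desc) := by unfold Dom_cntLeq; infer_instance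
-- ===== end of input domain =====

-- B replaces A's (n+1)x2x(target+1) push-style digit-DP table by a rolling 1-D array
-- (pull-style window sum) plus a scalar tight state; same results, O(target) space.


-- ===== PORT A =====
-- helper conv: A's greedy mixed-base digits, each digit capped at 4
def conv (x0 : Int) (coins_desc : List Int) : List Int :=
  (coins_desc.foldl (fun (st : List Int × Int) coin =>
    let d : Int :=
      if coin > st.2 then 0
      else
        let d := PySem.Int.floordiv st.2 coin
        if d > 4 then 4 else d
    (st.1 ++ [d], st.2 - d * coin)) ([], x0)).1

-- dp[a][b][c] read / write for the 3-level list (indices are the Python ones, always ≥ 0 in A)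
def pyGet3 (dp : List (List (List Int))) (a b c : Int) : Int :=
  ((dp.getD a.toNat []).getD b.toNat []).getD c.toNat 0

def pySet3 (dp : List (List (List Int))) (a b c : Int) (v : Int) : List (List (List Int)) :=
  dp.set a.toNat ((dp.getD a.toNat []).set b.toNat
    (((dp.getD a.toNat []).getD b.toNat []).set c.toNat v))

def cntLeq (X : Int) (target : Int) (coins_desc : List Int) : Int :=
  let rep := conv X coins_desc
  let n : Int := rep.length
  let dp : List (List (List Int)) :=
    (PySem.List.pyRange 0 (n + 1) 1).map (fun _ =>
      (PySem.List.pyRange 0 2 1).map (fun _ => List.replicate (target + 1).toNat 0))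
  let dp := pySet3 dp 0 1 0 1
  let dp := (PySem.List.pyRange 0 n 1).foldl (fun dp i =>
    (PySem.List.pyRange 0 2 1).foldl (fun dp tight =>
      (PySem.List.pyRange 0 (target + 1) 1).foldl (fun dp s =>
        let ways := pyGet3 dp i tight s
        if ways = 0 then dp
        else
          let max_digit := if tight = 1 then rep.getD i.toNat 0 else 4
          (PySem.List.pyRange 0 (max_digit + 1) 1).foldl (fun dp d =>
            let ns := s + d
            if ns > target then dp
            else
              let ntight : Int := if tight = 1 ∧ d = rep.getD i.toNat 0 then 1 else 0
              pySet3 dp (i + 1) ntight ns (pyGet3 dp (i + 1) ntight ns + ways)) dp) dp) dp) dp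
  pyGet3 dp n 0 target + pyGet3 dp n 1 target

-- ===== PORT B =====
def cntLeq_alt (X : Int) (target : Int) (coins_desc : List Int) : Int :=
  let rep := (coins_desc.foldl (fun (st : List Int × Int) coin =>
      let d : Int := if coin ≤ st.2 then min (PySem.Int.floordiv st.2 coin) 4 else 0
      (st.1 ++ [d], st.2 - d * coin)) ([], X)).1
  let st := rep.foldl (fun (st : List Int × Int × Bool) r =>
      let f := st.1
      let ps := st.2.1
      let ok := st.2.2
      let nf := (PySem.List.pyRange 0 (target + 1) 1).map (fun s =>
          (PySem.List.pyRange 0 (min 4 s + 1) 1).foldl (fun acc d => acc + f.getD (s - d).toNat 0) 0)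
      let nf := if ok then
          (PySem.List.pyRange 0 r 1).foldl (fun a d =>
            if ps + d ≤ target then a.set (ps + d).toNat (a.getD (ps + d).toNat 0 + 1) else a) nf
        else nf
      (nf, ps + r, ok && decide (0 ≤ r) && decide (ps + r ≤ target)))
    (List.replicate (target + 1).toNat 0, 0, true)
  st.1.getD target.toNat 0 + (if st.2.2 && decide (st.2.1 = target) then 1 else 0)

-- ===== PRECONDITION & SPEC =====
-- Pre_ excludes negative targets (A raises IndexError building/filling the dp table) and
-- coin lists containing 0 (A's conv raises ZeroDivisionError whenever the remaining amount
-- is ≥ 0 when the zero coin is reached; B's conv raises there as well).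
def Pre_cntLeq (X : Int) (target : Int) (coins_desc : List Int) : Prop :=
  0 ≤ target ∧ ∀ c ∈ coins_desc, c ≠ 0
instance (X : Int) (target : Int) (coins_desc : List Int) : Decidable (Pre_cntLeq X target coins_desc) := by unfold Pre_cntLeq; infer_instance

def pvWitness_cntLeq : Int × Int × List Int := (6, 3, [4, 1])

def Spec_cntLeq (X : Int) (target : Int) (coins_desc : List Int) (out : Int) : Prop := out = cntLeq_alt X target coins_desc
instance (X : Int) (target : Int) (coins_desc : List Int) (out : Int) : Decidable (Spec_cntLeq X target coins_desc out) := by unfold Spec_cntLeq; infer_instance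

-- ===== CLAIM (what is proved, stated in full; the proofs are below) =====
def Claim_equal_cntLeq : Prop := ∀ (X : Int) (target : Int) (coins_desc : List Int), Dom_cntLeq X target coins_desc → Pre_cntLeq X target coins_desc → Spec_cntLeq X target coins_desc (cntLeq X target coins_desc)

-- ===== LEMMAS AND PROOFS =====

-- ===== proof-side definitions =====
def zrowL (t : Int) : List Int := List.replicate (t + 1).toNat 0
def initRow (t : Int) : List (List Int) := [zrowL t, zrowL t]
def tRow (t : Int) (ok : Bool) (ps : Int) : List Int :=
  if ok then (zrowL t).set ps.toNat 1 else zrowL t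

def bodyA (t : Int) (rep : List Int) (dp : List (List (List Int))) (i : Int) : List (List (List Int)) :=
  (PySem.List.pyRange 0 2 1).foldl (fun dp tight =>
    (PySem.List.pyRange 0 (t + 1) 1).foldl (fun dp s =>
      let ways := pyGet3 dp i tight s
      if ways = 0 then dp
      else
        let max_digit := if tight = 1 then rep.getD i.toNat 0 else 4
        (PySem.List.pyRange 0 (max_digit + 1) 1).foldl (fun dp d =>
          let ns := s + d
          if ns > t then dp
          else
            let ntight : Int := if tight = 1 ∧ d = rep.getD i.toNat 0 then 1 else 0
            pySet3 dp (i + 1) ntight ns (pyGet3 dp (i + 1) ntight ns + ways)) dp) dp) dp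

def rowBody (t r : Int) (cur X : List (List Int)) : List (List Int) :=
  (PySem.List.pyRange 0 2 1).foldl (fun X tight =>
    (PySem.List.pyRange 0 (t + 1) 1).foldl (fun X s =>
      let ways := (cur.getD tight.toNat []).getD s.toNat 0
      if ways = 0 then X
      else
        let max_digit := if tight = 1 then r else 4
        (PySem.List.pyRange 0 (max_digit + 1) 1).foldl (fun X d =>
          let ns := s + d
          if ns > t then X
          else
            let nt : Int := if tight = 1 ∧ d = r then 1 else 0
            X.set nt.toNat ((X.getD nt.toNat []).set ns.toNat
              (((X.getD nt.toNat []).getD ns.toNat 0) + ways))) X) X) X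

def stepB (t : Int) (st : List Int × Int × Bool) (r : Int) : List Int × Int × Bool :=
  let f := st.1
  let ps := st.2.1
  let ok := st.2.2
  let nf := (PySem.List.pyRange 0 (t + 1) 1).map (fun s =>
      (PySem.List.pyRange 0 (min 4 s + 1) 1).foldl (fun acc d => acc + f.getD (s - d).toNat 0) 0)
  let nf := if ok then
      (PySem.List.pyRange 0 r 1).foldl (fun a d =>
        if ps + d ≤ t then a.set (ps + d).toNat (a.getD (ps + d).toNat 0 + 1) else a) nf
    else nf
  (nf, ps + r, ok && decide (0 ≤ r) && decide (ps + r ≤ t))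

def goodB (t : Int) (st : List Int × Int × Bool) : Prop :=
  st.1.length = (t + 1).toNat ∧ (st.2.2 = true → 0 ≤ st.2.1 ∧ st.2.1 ≤ t)

-- ===== generic lemmas =====
theorem foldl_enc {σ τ ι : Type} (enc : τ → σ) (l : List ι) (g : σ → ι → σ) (h : τ → ι → τ)
    (H : ∀ X : τ, ∀ x ∈ l, g (enc X) x = enc (h X x)) :
    ∀ X0, l.foldl g (enc X0) = enc (l.foldl h X0) := by
  induction l with
  | nil => intro X0; rfl
  | cons a l ih =>
    intro X0
    simp only [List.foldl_cons]
    rw [H X0 a (List.mem_cons_self), ih (fun X x hx => H X x (List.mem_cons_of_mem _ hx))]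

theorem set_getD_self (a : List Int) (k : Nat) : a.set k (a.getD k 0) = a := by
  rcases Nat.lt_or_ge k a.length with h | h
  · rw [List.getD_eq_getElem a 0 h, List.set_getElem_self]
  · rw [List.set_eq_of_length_le h]

theorem getD_append_add {α : Type} (E l : List α) (k : Nat) (d : α) :
    (E ++ l).getD (E.length + k) d = l.getD k d := by
  simp [List.getD, List.getElem?_append_right]

theorem set_append_add {α : Type} (E l : List α) (k : Nat) (v : α) :
    (E ++ l).set (E.length + k) v = E ++ l.set k v := by
  rw [List.set_append_right _ _ (by omega)]
  congr 2
  omega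

theorem getD_set (a : List Int) (i : Nat) (v : Int) (k : Nat) :
    (a.set i v).getD k 0 = if i = k ∧ i < a.length then v else a.getD k 0 := by
  simp [List.getD, List.getElem?_set]
  split
  · rename_i h; subst h
    split <;> simp_all
  · split <;> simp_all

theorem getD_zrow (t : Int) (k : Nat) : (zrowL t).getD k 0 = 0 := by
  simp [zrowL, List.getD, List.getElem?_replicate]
  split <;> simp

theorem sum_ite_eq_mem (l : List Int) (hl : l.Nodup) (a : Int) (g : Int → Int) :
    (l.map (fun s => if s = a then g s else 0)).sum = if a ∈ l then g a else 0 := by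
  induction l with
  | nil => simp
  | cons b l ih =>
    simp only [List.map_cons, List.sum_cons, List.mem_cons]
    rcases List.nodup_cons.mp hl with ⟨hb, hl'⟩
    by_cases h : b = a
    · subst h
      simp [hb, ih hl']
    · simp [h, ih hl']
      by_cases h2 : a ∈ l <;> simp [h2, Ne.symm h]

theorem foldl_foldl_flat {σ ι κ : Type} (l : List ι) (m : ι → List κ) (g : σ → ι → κ → σ) (q0 : σ) :
    l.foldl (fun q s => (m s).foldl (fun q d => g q s d) q) q0
      = (l.flatMap (fun s => (m s).map (Prod.mk s))).foldl (fun q p => g q p.1 p.2) q0 := by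
  induction l generalizing q0 with
  | nil => rfl
  | cons a l ih =>
    simp only [List.foldl_cons, List.flatMap_cons, List.foldl_append, List.foldl_map]
    rw [ih]

theorem getD_foldl_bump {ι : Type} (l : List ι) (c : ι → Bool) (g : ι → Nat) (v : ι → Int) :
    ∀ (q : List Int) (k : Nat),
    ((l.foldl (fun q x => if c x then q.set (g x) (q.getD (g x) 0 + v x) else q) q).getD k 0)
      = q.getD k 0 + ((l.filter (fun x => c x && (g x == k) && decide (g x < q.length))).map v).sum := by
  induction l with
  | nil => intro q k; simp
  | cons a l ih =>
    intro q k
    simp only [List.foldl_cons, List.filter_cons]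
    by_cases hc : c a = true
    · rw [if_pos hc]
      by_cases hr : g a < q.length
      · have hlen : (q.set (g a) (q.getD (g a) 0 + v a)).length = q.length := by simp
        rw [ih, hlen, getD_set]
        by_cases hk : g a = k
        · subst hk
          simp [hc, hr]
          ring
        · have : (g a == k) = false := by simp [hk]
          simp [hc, hr, hk, this]
      · rw [List.set_eq_of_length_le (by omega), ih]
        have : decide (g a < q.length) = false := by simp; omega
        simp [hc, this]
    · rw [if_neg hc, ih]
      simp [hc]

theorem getD_append_head {α : Type} (E : List α) (x : α) (R : List α) (d : α) :
    (E ++ x :: R).getD E.length d = x := by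
  have := getD_append_add E (x :: R) 0 d
  simpa using this

theorem bodyA_shape (t : Int) (rep : List Int) (E R : List (List (List Int)))
    (cur X : List (List Int)) (r : Int) (hr : rep.getD E.length 0 = r) :
    bodyA t rep (E ++ cur :: X :: R) (E.length : Int)
      = E ++ cur :: rowBody t r cur X :: R := by
  unfold bodyA rowBody
  have htn : ((E.length : Int)).toNat = E.length := by omega
  have htn1 : ((E.length : Int) + 1).toNat = E.length + 1 := by omega
  refine foldl_enc (fun Y => E ++ cur :: Y :: R) _ _ _ ?_ X
  intro Y tight _
  refine foldl_enc (fun Z => E ++ cur :: Z :: R) _ _ _ ?_ Y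
  intro Z s _
  have hways : pyGet3 (E ++ cur :: Z :: R) (E.length : Int) tight s
      = (cur.getD tight.toNat []).getD s.toNat 0 := by
    unfold pyGet3
    rw [htn, getD_append_head]
  simp only [hways, htn, hr]
  split
  · rfl
  · refine foldl_enc (fun W => E ++ cur :: W :: R) _ _ _ ?_ Z
    intro W d _
    split
    · rfl
    · unfold pySet3 pyGet3
      simp only [htn1]
      have hget : (E ++ cur :: W :: R).getD (E.length + 1) [] = W := by
        have := getD_append_add E (cur :: W :: R) 1 []
        simpa using this
      have hset : ∀ v, (E ++ cur :: W :: R).set (E.length + 1) v = E ++ cur :: v :: R := by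
        intro v
        have := set_append_add E (cur :: W :: R) 1 v
        simpa using this
      simp only [hget]
      rw [hset]

theorem outer_loop (t : Int) (rep : List Int) :
    ∀ (rest : List Int) (E : List (List (List Int))) (cur : List (List Int)),
    rep.drop E.length = rest →
    ∃ E2 : List (List (List Int)), E2.length = E.length + rest.length ∧
      (PySem.List.pyRange (E.length : Int) ((E.length : Int) + rest.length) 1).foldl (bodyA t rep)
        (E ++ cur :: List.replicate rest.length (initRow t))
      = E2 ++ [rest.foldl (fun c r' => rowBody t r' c (initRow t)) cur] := by
  intro rest
  induction rest with
  | nil =>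
    intro E cur _
    refine ⟨E, by simp, ?_⟩
    simp
  | cons r rest' ih =>
    intro E cur hdrop
    have hr : rep.getD E.length 0 = r := by
      have h1 : rep[E.length]? = some r := by
        rw [← List.head?_drop, hdrop]; rfl
      simp [List.getD, h1]
    have hlt : (E.length : Int) < (E.length : Int) + ((r :: rest').length : Int) := by
      simp
    rw [PySem.List.pyRange_one_cons hlt]
    simp only [List.foldl_cons]
    have hshape := bodyA_shape t rep E (List.replicate rest'.length (initRow t)) cur (initRow t) r hr
    have hrepl : List.replicate (r :: rest').length (initRow t)
        = initRow t :: List.replicate rest'.length (initRow t) := rfl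
    rw [hrepl, hshape]
    have hdrop' : rep.drop (E ++ [cur]).length = rest' := by
      have : rep.drop (E.length + 1) = rest' := by
        rw [← List.tail_drop, hdrop]; rfl
      simpa using this
    obtain ⟨E2, hE2len, hE2⟩ := ih (E ++ [cur]) (rowBody t r cur (initRow t)) hdrop'
    refine ⟨E2, by simp at hE2len ⊢; omega, ?_⟩
    have harr : E ++ cur :: rowBody t r cur (initRow t) :: List.replicate rest'.length (initRow t)
        = (E ++ [cur]) ++ rowBody t r cur (initRow t) :: List.replicate rest'.length (initRow t) := by
      simp
    rw [harr]
    have hrange : PySem.List.pyRange ((E.length : Int) + 1) ((E.length : Int) + ((r :: rest').length : Int)) 1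
        = PySem.List.pyRange (((E ++ [cur]).length : Int)) (((E ++ [cur]).length : Int) + (rest'.length : Int)) 1 := by
      congr 1 <;> simp <;> push_cast <;> ring
    rw [hrange, hE2]

def sPass (t r : Int) (tight : Int) (cur : List (List Int)) (X : List (List Int)) : List (List Int) :=
  (PySem.List.pyRange 0 (t + 1) 1).foldl (fun X s =>
    let ways := (cur.getD tight.toNat []).getD s.toNat 0
    if ways = 0 then X
    else
      let max_digit := if tight = 1 then r else 4
      (PySem.List.pyRange 0 (max_digit + 1) 1).foldl (fun X d =>
        let ns := s + d
        if ns > t then X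
        else
          let nt : Int := if tight = 1 ∧ d = r then 1 else 0
          X.set nt.toNat ((X.getD nt.toNat []).set ns.toNat
            (((X.getD nt.toNat []).getD ns.toNat 0) + ways))) X) X

theorem rowBody_eq_passes (t r : Int) (cur X : List (List Int)) :
    rowBody t r cur X = sPass t r 1 cur (sPass t r 0 cur X) := by
  unfold rowBody sPass
  rw [(by decide : PySem.List.pyRange 0 2 1 = [0, 1])]
  rfl

-- push-style accumulation for the free (tight = 0) row
def pushF (t : Int) (F : List Int) (Q : List Int) : List Int :=
  (PySem.List.pyRange 0 (t + 1) 1).foldl (fun Q s =>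
    if F.getD s.toNat 0 = 0 then Q
    else
      (PySem.List.pyRange 0 5 1).foldl (fun Q d =>
        if s + d > t then Q
        else Q.set (s + d).toNat (Q.getD (s + d).toNat 0 + F.getD s.toNat 0)) Q) Q

theorem pass0_shape (t r : Int) (F T Z : List Int) (Q : List Int) :
    sPass t r 0 [F, T] [Q, Z] = [pushF t F Q, Z] := by
  unfold sPass pushF
  refine foldl_enc (fun Q => [Q, Z]) _ _ _ ?_ Q
  intro Q1 s _
  simp only [Int.toNat_zero]
  have h0 : (([F, T] : List (List Int)).getD 0 []) = F := rfl
  rw [h0]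
  split
  · rfl
  · have h1 : ((0:Int) = 1) = False := by simp
    simp only [h1, if_false]
    refine foldl_enc (fun Q => [Q, Z]) _ _ _ ?_ Q1
    intro Q2 d _
    split
    · rfl
    · simp only [h1, false_and, if_false]
      rfl

theorem sum_filter_eq_sum_ite {ι : Type} (l : List ι) (c : ι → Bool) (v : ι → Int) :
    ((l.filter c).map v).sum = (l.map (fun x => if c x then v x else 0)).sum := by
  induction l with
  | nil => rfl
  | cons a l ih =>
    rw [List.filter_cons]
    by_cases h : c a = true
    · simp [h, ih]
    · simp [h, ih]

theorem pushF_getD (t : Int) (F : List Int) (Q : List Int) (k : Nat) :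
    (pushF t F Q).getD k 0 = Q.getD k 0 +
      (((PySem.List.pyRange 0 (t + 1) 1).flatMap
          (fun s => (PySem.List.pyRange 0 5 1).map (Prod.mk s))).map
        (fun p => if (decide (p.1 + p.2 ≤ t) && ((p.1 + p.2).toNat == k) && decide ((p.1 + p.2).toNat < Q.length)) = true
                  then F.getD p.1.toNat 0 else 0)).sum := by
  unfold pushF
  have step1 : (PySem.List.pyRange 0 (t + 1) 1).foldl (fun Q s =>
      if F.getD s.toNat 0 = 0 then Q
      else
        (PySem.List.pyRange 0 5 1).foldl (fun Q d =>
          if s + d > t then Q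
          else Q.set (s + d).toNat (Q.getD (s + d).toNat 0 + F.getD s.toNat 0)) Q) Q
    = (PySem.List.pyRange 0 (t + 1) 1).foldl (fun Q s =>
        (PySem.List.pyRange 0 5 1).foldl (fun Q d =>
          if decide (s + d ≤ t) = true then Q.set (s + d).toNat (Q.getD (s + d).toNat 0 + F.getD s.toNat 0)
          else Q) Q) Q := by
    refine PySem.List.foldl_congr_mem _ _ _ _ ?_
    intro Q1 s _
    by_cases hF : F.getD s.toNat 0 = 0
    · rw [if_pos hF]
      have : ∀ (Q2 : List Int), (PySem.List.pyRange 0 5 1).foldl (fun Q d =>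
          if decide (s + d ≤ t) = true then Q.set (s + d).toNat (Q.getD (s + d).toNat 0 + F.getD s.toNat 0)
          else Q) Q2 = Q2 := by
        intro Q2
        have hcg : ∀ (Q3 : List Int), ∀ d ∈ PySem.List.pyRange 0 5 1,
            (if decide (s + d ≤ t) = true then Q3.set (s + d).toNat (Q3.getD (s + d).toNat 0 + F.getD s.toNat 0)
             else Q3) = Q3 := by
          intro Q3 d _
          rw [hF, add_zero]
          split
          · exact set_getD_self _ _
          · rfl
        rw [PySem.List.foldl_congr_mem _ _ _ _ hcg, PySem.List.foldl_ignore]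
      rw [this]
    · rw [if_neg hF]
      refine PySem.List.foldl_congr_mem _ _ _ _ ?_
      intro Q2 d _
      by_cases hd : s + d ≤ t
      · rw [if_neg (by omega), if_pos (by simpa using hd)]
      · rw [if_pos (by omega), if_neg (by simpa using hd)]
  rw [step1, foldl_foldl_flat]
  rw [getD_foldl_bump ((PySem.List.pyRange 0 (t + 1) 1).flatMap
      (fun s => (PySem.List.pyRange 0 5 1).map (Prod.mk s)))
      (fun p => decide (p.1 + p.2 ≤ t)) (fun p => (p.1 + p.2).toNat) (fun p => F.getD p.1.toNat 0) Q k]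
  rw [sum_filter_eq_sum_ite]


theorem sum_flatMap' {ι κ : Type} (l : List ι) (f : ι → List κ) (v : κ → Int) :
    ((l.flatMap f).map v).sum = (l.map (fun a => ((f a).map v).sum)).sum := by
  rw [List.map_flatMap, List.flatMap_def, List.sum_flatten, List.map_map]
  rfl

theorem pushF_zrow_entry (t : Int) (ht : 0 ≤ t) (F : List Int) (k : Nat) (hk : k < (t + 1).toNat) :
    (pushF t F (zrowL t)).getD k 0
      = (PySem.List.pyRange 0 (min 4 (k : Int) + 1) 1).foldl
          (fun acc d => acc + F.getD ((k : Int) - d).toNat 0) 0 := by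
  have hkt : (k : Int) ≤ t := by omega
  rw [pushF_getD, getD_zrow, zero_add]
  have hlen : (zrowL t).length = (t + 1).toNat := by simp [zrowL]
  rw [hlen, sum_flatMap']
  have hcg : ∀ s ∈ PySem.List.pyRange 0 (t + 1) 1,
      (((PySem.List.pyRange 0 5 1).map (Prod.mk s)).map
        (fun p : Int × Int => if (decide (p.1 + p.2 ≤ t) && ((p.1 + p.2).toNat == k) && decide ((p.1 + p.2).toNat < (t + 1).toNat)) = true
           then F.getD p.1.toNat 0 else 0)).sum
      = (if s = (k : Int) - 0 then F.getD s.toNat 0 else 0)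
        + (if s = (k : Int) - 1 then F.getD s.toNat 0 else 0)
        + (if s = (k : Int) - 2 then F.getD s.toNat 0 else 0)
        + (if s = (k : Int) - 3 then F.getD s.toNat 0 else 0)
        + (if s = (k : Int) - 4 then F.getD s.toNat 0 else 0) := by
    intro s hs
    rw [PySem.List.mem_pyRange_one] at hs
    have hG : ∀ d : Int, 0 ≤ d →
        (if (decide (s + d ≤ t) && ((s + d).toNat == k) && decide ((s + d).toNat < (t + 1).toNat)) = true
         then F.getD s.toNat 0 else 0) = (if s = (k : Int) - d then F.getD s.toNat 0 else 0) := by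
      intro d hd
      by_cases h : s = (k : Int) - d
      · rw [if_pos h, if_pos]
        simp only [Bool.and_eq_true, decide_eq_true_eq, beq_iff_eq]
        omega
      · rw [if_neg h, if_neg]
        simp only [Bool.and_eq_true, decide_eq_true_eq, beq_iff_eq]
        omega
    rw [(by decide : PySem.List.pyRange 0 5 1 = [0, 1, 2, 3, 4])]
    simp only [List.map_cons, List.map_nil, List.sum_cons, List.sum_nil]
    rw [hG 0 (by omega), hG 1 (by omega), hG 2 (by omega), hG 3 (by omega), hG 4 (by omega)]
    ring
  rw [List.map_congr_left hcg]
  rw [PySem.List.sum_map_add_int, PySem.List.sum_map_add_int, PySem.List.sum_map_add_int,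
      PySem.List.sum_map_add_int]
  rw [sum_ite_eq_mem _ (PySem.List.nodup_pyRange_one _ _), sum_ite_eq_mem _ (PySem.List.nodup_pyRange_one _ _),
      sum_ite_eq_mem _ (PySem.List.nodup_pyRange_one _ _), sum_ite_eq_mem _ (PySem.List.nodup_pyRange_one _ _),
      sum_ite_eq_mem _ (PySem.List.nodup_pyRange_one _ _)]
  simp only [PySem.List.mem_pyRange_one]
  rw [PySem.List.foldl_add]
  rw [zero_add]
  by_cases h4 : 4 ≤ (k : Int)
  · rw [min_eq_left h4]
    rw [(by decide : PySem.List.pyRange 0 (4 + 1) 1 = [0, 1, 2, 3, 4])]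
    simp only [List.map_cons, List.map_nil, List.sum_cons, List.sum_nil]
    rw [if_pos (by omega), if_pos (by omega), if_pos (by omega), if_pos (by omega), if_pos (by omega)]
    ring
  · have hk4 : k < 4 := by omega
    interval_cases k
    · rw [if_pos (by omega), if_neg (by omega), if_neg (by omega), if_neg (by omega), if_neg (by omega)]
      push_cast
      rw [show min (4:Int) 0 = 0 by omega]
      rw [(by decide : PySem.List.pyRange 0 (0 + 1) 1 = [0])]
      simp
    · rw [if_pos (by omega), if_pos (by omega), if_neg (by omega), if_neg (by omega), if_neg (by omega)]
      push_cast
      rw [show min (4:Int) 1 = 1 by omega]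
      rw [(by decide : PySem.List.pyRange 0 (1 + 1) 1 = [0, 1])]
      simp
    · rw [if_pos (by omega), if_pos (by omega), if_pos (by omega), if_neg (by omega), if_neg (by omega)]
      push_cast
      rw [show min (4:Int) 2 = 2 by omega]
      rw [(by decide : PySem.List.pyRange 0 (2 + 1) 1 = [0, 1, 2])]
      simp
      ring
    · rw [if_pos (by omega), if_pos (by omega), if_pos (by omega), if_pos (by omega), if_neg (by omega)]
      push_cast
      rw [show min (4:Int) 3 = 3 by omega]
      rw [(by decide : PySem.List.pyRange 0 (3 + 1) 1 = [0, 1, 2, 3])]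
      simp
      ring

theorem length_foldl_sets {ι : Type} (l : List ι) (f : List Int → ι → List Int)
    (h : ∀ q x, (f q x).length = q.length) : ∀ q, (l.foldl f q).length = q.length := by
  induction l with
  | nil => intro q; rfl
  | cons a l ih => intro q; rw [List.foldl_cons, ih, h]

theorem pushF_length (t : Int) (F Q : List Int) : (pushF t F Q).length = Q.length := by
  unfold pushF
  refine length_foldl_sets _ _ ?_ Q
  intro q s
  split
  · rfl
  · refine length_foldl_sets _ _ ?_ q
    intro q' d
    split
    · rfl
    · simp

def nfList (t : Int) (F : List Int) : List Int :=
  (PySem.List.pyRange 0 (t + 1) 1).map (fun s =>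
    (PySem.List.pyRange 0 (min 4 s + 1) 1).foldl (fun acc d => acc + F.getD (s - d).toNat 0) 0)

theorem pushF_zrow_eq_nf (t : Int) (ht : 0 ≤ t) (F : List Int) :
    pushF t F (zrowL t) = nfList t F := by
  have hlen1 : (pushF t F (zrowL t)).length = (t + 1).toNat := by
    rw [pushF_length]; simp [zrowL]
  have hlen2 : (nfList t F).length = (t + 1).toNat := by
    simp [nfList, PySem.List.length_pyRange_one]
  apply List.ext_getElem (by rw [hlen1, hlen2])
  intro k h1 h2
  have e1 : (pushF t F (zrowL t))[k] = (pushF t F (zrowL t)).getD k 0 :=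
    (List.getD_eq_getElem _ 0 h1).symm
  rw [e1, pushF_zrow_entry t ht F k (by omega)]
  unfold nfList
  rw [List.getElem_map]
  rw [PySem.List.getElem_pyRange_one]
  rw [zero_add]

theorem pass1_notok (t r : Int) (F P Z : List Int) :
    sPass t r 1 [F, zrowL t] [P, Z] = [P, Z] := by
  unfold sPass
  have hcg : ∀ (X : List (List Int)), ∀ s ∈ PySem.List.pyRange 0 (t + 1) 1,
      (let ways := (([F, zrowL t] : List (List Int)).getD (1:Int).toNat []).getD s.toNat 0
       if ways = 0 then X
       else
         let max_digit := if (1:Int) = 1 then r else 4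
         (PySem.List.pyRange 0 (max_digit + 1) 1).foldl (fun X d =>
           let ns := s + d
           if ns > t then X
           else
             let nt : Int := if (1:Int) = 1 ∧ d = r then 1 else 0
             X.set nt.toNat ((X.getD nt.toNat []).set ns.toNat
               (((X.getD nt.toNat []).getD ns.toNat 0) + ways))) X) = X := by
    intro X s _
    have hw : (([F, zrowL t] : List (List Int)).getD (1:Int).toNat []).getD s.toNat 0 = 0 := by
      have : (([F, zrowL t] : List (List Int)).getD (1:Int).toNat []) = zrowL t := rfl
      rw [this, getD_zrow]
    simp only [hw, if_pos]
  rw [PySem.List.foldl_congr_mem _ _ _ _ hcg, PySem.List.foldl_ignore]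

theorem pass1_ok (t : Int) (ht : 0 ≤ t) (r : Int) (F P : List Int) (ps : Int)
    (hps0 : 0 ≤ ps) (hps1 : ps ≤ t) :
    sPass t r 1 [F, (zrowL t).set ps.toNat 1] [P, zrowL t]
      = [(PySem.List.pyRange 0 r 1).foldl (fun a d =>
            if ps + d ≤ t then a.set (ps + d).toNat (a.getD (ps + d).toNat 0 + 1) else a) P,
         tRow t (decide (0 ≤ r) && decide (ps + r ≤ t)) (ps + r)] := by
  have hLz : (zrowL t).length = (t + 1).toNat := by simp [zrowL]
  have hpsL : ps.toNat < (t + 1).toNat := by omega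
  have hw : ((zrowL t).set ps.toNat 1).getD ps.toNat 0 = 1 := by
    rw [getD_set, if_pos ⟨rfl, by omega⟩]
  unfold sPass
  have hcg : ∀ (X : List (List Int)), ∀ s ∈ PySem.List.pyRange 0 (t + 1) 1,
      (let ways := (([F, (zrowL t).set ps.toNat 1] : List (List Int)).getD (1:Int).toNat []).getD s.toNat 0
       if ways = 0 then X
       else
         let max_digit := if (1:Int) = 1 then r else 4
         (PySem.List.pyRange 0 (max_digit + 1) 1).foldl (fun X d =>
           let ns := s + d
           if ns > t then X
           else
             let nt : Int := if (1:Int) = 1 ∧ d = r then 1 else 0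
             X.set nt.toNat ((X.getD nt.toNat []).set ns.toNat
               (((X.getD nt.toNat []).getD ns.toNat 0) + ways))) X)
      = (if s = ps then
          (PySem.List.pyRange 0 (r + 1) 1).foldl (fun X d =>
            if ps + d > t then X
            else
              X.set (if d = r then (1:Int) else 0).toNat
                ((X.getD (if d = r then (1:Int) else 0).toNat []).set (ps + d).toNat
                  (((X.getD (if d = r then (1:Int) else 0).toNat []).getD (ps + d).toNat 0) + 1))) X
         else X) := by
    intro X s hs
    rw [PySem.List.mem_pyRange_one] at hs
    have hT : (([F, (zrowL t).set ps.toNat 1] : List (List Int)).getD (1:Int).toNat [])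
        = (zrowL t).set ps.toNat 1 := rfl
    by_cases hsp : s = ps
    · subst hsp
      simp only [hT]
      rw [hw]
      simp
    · have hw0 : ((zrowL t).set ps.toNat 1).getD s.toNat 0 = 0 := by
        rw [getD_set, if_neg, getD_zrow]
        intro hcon
        exact hsp (by omega)
      simp only [hT]
      rw [hw0]
      simp [hsp]
  rw [PySem.List.foldl_congr_mem _ _ _ _ hcg]
  rw [PySem.List.foldl_ite_eq_foldl_filter (fun s => s = ps)
      (fun (X : List (List Int)) (_ : Int) =>
        (PySem.List.pyRange 0 (r + 1) 1).foldl (fun X d =>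
          if ps + d > t then X
          else
            X.set (if d = r then (1:Int) else 0).toNat
              ((X.getD (if d = r then (1:Int) else 0).toNat []).set (ps + d).toNat
                (((X.getD (if d = r then (1:Int) else 0).toNat []).getD (ps + d).toNat 0) + 1))) X)
      (PySem.List.pyRange 0 (t + 1) 1) [P, zrowL t]]
  have hfil : (PySem.List.pyRange 0 (t + 1) 1).filter (fun s => decide (s = ps)) = [ps] := by
    have h2 : ∀ x ∈ PySem.List.pyRange 0 (t + 1) 1, (decide (x = ps)) = (x == ps) := by
      intro x _
      by_cases h : x = ps <;> simp [h]
    rw [List.filter_congr h2, List.filter_beq,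
        List.count_eq_one_of_mem (PySem.List.nodup_pyRange_one _ _)
          (PySem.List.mem_pyRange_one.mpr ⟨hps0, by omega⟩)]
    rfl
  rw [hfil]
  simp only [List.foldl_cons, List.foldl_nil]
  by_cases hr : 0 ≤ r
  · rw [PySem.List.pyRange_one_succ_right hr, List.foldl_append]
    have hpart1 : ∀ (Z : List Int), (PySem.List.pyRange 0 r 1).foldl (fun X d =>
        if ps + d > t then X
        else
          X.set (if d = r then (1:Int) else 0).toNat
            ((X.getD (if d = r then (1:Int) else 0).toNat []).set (ps + d).toNat
              (((X.getD (if d = r then (1:Int) else 0).toNat []).getD (ps + d).toNat 0) + 1)))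
        ([P, Z] : List (List Int))
      = [(PySem.List.pyRange 0 r 1).foldl (fun a d =>
            if ps + d ≤ t then a.set (ps + d).toNat (a.getD (ps + d).toNat 0 + 1) else a) P, Z] := by
      intro Z
      have hstep : ∀ (a : List Int), ∀ d ∈ PySem.List.pyRange 0 r 1,
          (fun (X : List (List Int)) d =>
            if ps + d > t then X
            else
              X.set (if d = r then (1:Int) else 0).toNat
                ((X.getD (if d = r then (1:Int) else 0).toNat []).set (ps + d).toNat
                  (((X.getD (if d = r then (1:Int) else 0).toNat []).getD (ps + d).toNat 0) + 1)))
            ([a, Z] : List (List Int)) d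
          = [(fun (a : List Int) d => if ps + d ≤ t then a.set (ps + d).toNat (a.getD (ps + d).toNat 0 + 1) else a) a d, Z] := by
        intro a d hd
        rw [PySem.List.mem_pyRange_one] at hd
        have hdr : (d = r) = False := by simp; omega
        simp only [hdr, if_false]
        by_cases hle : ps + d ≤ t
        · rw [if_neg (by omega), if_pos hle]
          rfl
        · rw [if_pos (by omega), if_neg hle]
      exact foldl_enc (fun a => [a, Z]) _ _ _ hstep P
    rw [hpart1 (zrowL t)]
    simp only [List.foldl_cons, List.foldl_nil]
    simp only [if_true]
    by_cases hlast : ps + r > t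
    · rw [if_pos hlast]
      have : (decide (0 ≤ r) && decide (ps + r ≤ t)) = false := by simp; omega
      rw [this]
      rfl
    · rw [if_neg hlast]
      have hok : (decide (0 ≤ r) && decide (ps + r ≤ t)) = true := by simp; omega
      rw [hok]
      simp only [tRow, if_pos]
      have h1 : ((1:Int)).toNat = 1 := rfl
      rw [h1]
      have hgd : (([(PySem.List.pyRange 0 r 1).foldl (fun a d =>
            if ps + d ≤ t then a.set (ps + d).toNat (a.getD (ps + d).toNat 0 + 1) else a) P, zrowL t] : List (List Int)).getD 1 []) = zrowL t := rfl
      rw [hgd, getD_zrow, zero_add]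
      rfl
  · have hemp : PySem.List.pyRange 0 (r + 1) 1 = [] := by
      rw [PySem.List.pyRange_one, show ((r + 1) - 0).toNat = 0 from by omega]
      rfl
    have hemp0 : PySem.List.pyRange 0 r 1 = [] := by
      rw [PySem.List.pyRange_one, show (r - 0).toNat = 0 from by omega]
      rfl
    rw [hemp, hemp0]
    simp only [List.foldl_nil]
    have : (decide (0 ≤ r) && decide (ps + r ≤ t)) = false := by simp; omega
    rw [this]
    rfl

theorem rowBody_spec (t : Int) (ht : 0 ≤ t) (r : Int) (st : List Int × Int × Bool)
    (hgood : goodB t st) :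
    rowBody t r [st.1, tRow t st.2.2 st.2.1] (initRow t)
      = [(stepB t st r).1, tRow t (stepB t st r).2.2 (stepB t st r).2.1] := by
  obtain ⟨F, ps, ok⟩ := st
  obtain ⟨hF, hinv⟩ := hgood
  rw [rowBody_eq_passes]
  have hinit : initRow t = ([zrowL t, zrowL t] : List (List Int)) := rfl
  rw [hinit, pass0_shape, pushF_zrow_eq_nf t ht F]
  cases ok with
  | false =>
    have htr : tRow t false ps = zrowL t := rfl
    rw [htr, pass1_notok]
    have h1 : (stepB t (F, ps, false) r).1 = nfList t F := rfl
    have h2 : (stepB t (F, ps, false) r).2.2 = false := by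
      simp [stepB]
    rw [h1, h2]
    rfl
  | true =>
    obtain ⟨h0, h1⟩ := hinv rfl
    have htr : tRow t true ps = (zrowL t).set ps.toNat 1 := rfl
    rw [htr, pass1_ok t ht r F (nfList t F) ps h0 h1]
    have e1 : (stepB t (F, ps, true) r).1
        = (PySem.List.pyRange 0 r 1).foldl (fun a d =>
            if ps + d ≤ t then a.set (ps + d).toNat (a.getD (ps + d).toNat 0 + 1) else a) (nfList t F) := rfl
    have e2 : (stepB t (F, ps, true) r).2.2 = (decide (0 ≤ r) && decide (ps + r ≤ t)) := by
      simp [stepB]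
    have e3 : (stepB t (F, ps, true) r).2.1 = ps + r := rfl
    rw [e1, e2, e3]

theorem goodB_step (t : Int) (ht : 0 ≤ t) (st : List Int × Int × Bool) (r : Int)
    (hgood : goodB t st) : goodB t (stepB t st r) := by
  obtain ⟨F, ps, ok⟩ := st
  obtain ⟨hF, hinv⟩ := hgood
  constructor
  · show (stepB t (F, ps, ok) r).1.length = (t + 1).toNat
    unfold stepB
    simp only
    split
    · refine Eq.trans (length_foldl_sets _ _ ?_ _) ?_
      · intro q d
        split
        · simp
        · rfl
      · simp [PySem.List.length_pyRange_one]
    · simp [PySem.List.length_pyRange_one]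
  · show (stepB t (F, ps, ok) r).2.2 = true → _
    unfold stepB
    simp only
    intro h
    simp only [Bool.and_eq_true, decide_eq_true_eq] at h
    obtain ⟨⟨hok, hr⟩, hle⟩ := h
    have hb := hinv hok
    have e3 : ((F, ps, ok) : List Int × Int × Bool).2.1 = ps := rfl
    rw [e3] at hb
    constructor <;> omega

theorem fold_corr (t : Int) (ht : 0 ≤ t) :
    ∀ (rep : List Int) (st : List Int × Int × Bool), goodB t st →
    rep.foldl (fun c r => rowBody t r c (initRow t)) [st.1, tRow t st.2.2 st.2.1]
      = [(rep.foldl (stepB t) st).1, tRow t (rep.foldl (stepB t) st).2.2 (rep.foldl (stepB t) st).2.1] := by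
  intro rep
  induction rep with
  | nil => intro st _; rfl
  | cons r rep ih =>
    intro st hgood
    simp only [List.foldl_cons]
    rw [rowBody_spec t ht r st hgood]
    exact ih (stepB t st r) (goodB_step t ht st r hgood)

theorem goodB_fold (t : Int) (ht : 0 ≤ t) (rep : List Int) :
    ∀ (st : List Int × Int × Bool), goodB t st → goodB t (rep.foldl (stepB t) st) := by
  induction rep with
  | nil => intro st h; exact h
  | cons r rep ih =>
    intro st h
    exact ih (stepB t st r) (goodB_step t ht st r h)

theorem convB_eq (X : Int) (c : List Int) :
    (c.foldl (fun (st : List Int × Int) coin =>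
      let d : Int := if coin ≤ st.2 then min (PySem.Int.floordiv st.2 coin) 4 else 0
      (st.1 ++ [d], st.2 - d * coin)) ([], X)).1 = conv X c := by
  unfold conv
  refine congrArg Prod.fst ?_
  refine PySem.List.foldl_congr_mem _ _ _ _ ?_
  intro st coin _
  simp only
  congr 1
  · congr 1
    by_cases h : coin ≤ st.2
    · rw [if_pos h, if_neg (by omega)]
      simp [min_def]
      omega
    · rw [if_neg h, if_pos (by omega)]
  · by_cases h : coin ≤ st.2
    · rw [if_pos h, if_neg (by omega)]
      have : min (PySem.Int.floordiv st.2 coin) 4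
          = (if PySem.Int.floordiv st.2 coin > 4 then 4 else PySem.Int.floordiv st.2 coin) := by
        simp [min_def]
        omega
      rw [this]
    · rw [if_neg h, if_pos (by omega)]

theorem cntLeq_eq (X t : Int) (c : List Int) :
    cntLeq X t c =
      (let rep := conv X c
       let n : Int := rep.length
       let dp : List (List (List Int)) :=
         (PySem.List.pyRange 0 (n + 1) 1).map (fun _ =>
           (PySem.List.pyRange 0 2 1).map (fun _ => List.replicate (t + 1).toNat 0))
       let dp := pySet3 dp 0 1 0 1
       let dp := (PySem.List.pyRange 0 n 1).foldl (bodyA t rep) dp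
       pyGet3 dp n 0 t + pyGet3 dp n 1 t) := rfl

theorem cntLeq_alt_eq (X t : Int) (c : List Int) :
    cntLeq_alt X t c =
      (let rep := (c.foldl (fun (st : List Int × Int) coin =>
          let d : Int := if coin ≤ st.2 then min (PySem.Int.floordiv st.2 coin) 4 else 0
          (st.1 ++ [d], st.2 - d * coin)) ([], X)).1
       let st := rep.foldl (stepB t) (zrowL t, 0, true)
       st.1.getD t.toNat 0 + (if st.2.2 && decide (st.2.1 = t) then 1 else 0)) := rfl

theorem main_equiv (X t : Int) (c : List Int) (ht : 0 ≤ t) : cntLeq X t c = cntLeq_alt X t c := by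
  rw [cntLeq_eq, cntLeq_alt_eq]
  simp only
  rw [convB_eq]
  have hgd0 : goodB t ((zrowL t, 0, true) : List Int × Int × Bool) := by
    refine ⟨by simp [zrowL], fun _ => ⟨le_refl 0, ht⟩⟩
  have hinner : (PySem.List.pyRange 0 2 1).map
      (fun _ => List.replicate (t + 1).toNat 0) = initRow t := by
    rw [(by decide : PySem.List.pyRange 0 2 1 = [0, 1])]
    rfl
  rw [hinner]
  have houter : (PySem.List.pyRange 0 (((conv X c).length : Int) + 1) 1).map (fun _ => initRow t)
      = List.replicate ((conv X c).length + 1) (initRow t) := by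
    rw [List.map_const']
    rw [PySem.List.length_pyRange_one]
    rw [show ((((conv X c).length : Int) + 1) - 0).toNat = (conv X c).length + 1 from by omega]
  rw [houter]
  have hset : pySet3 (List.replicate ((conv X c).length + 1) (initRow t)) 0 1 0 1
      = [zrowL t, tRow t true 0] :: List.replicate (conv X c).length (initRow t) := rfl
  rw [hset]
  obtain ⟨E2, hlen, hfold⟩ := outer_loop t (conv X c) (conv X c) [] [zrowL t, tRow t true 0] (by simp)
  simp only [List.length_nil, Nat.cast_zero, zero_add, List.nil_append] at hfold hlen
  rw [hfold]
  have hc : (conv X c).foldl (fun cu r => rowBody t r cu (initRow t)) [zrowL t, tRow t true 0]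
      = [((conv X c).foldl (stepB t) (zrowL t, 0, true)).1,
         tRow t ((conv X c).foldl (stepB t) (zrowL t, 0, true)).2.2
           ((conv X c).foldl (stepB t) (zrowL t, 0, true)).2.1] :=
    fold_corr t ht (conv X c) (zrowL t, 0, true) hgd0
  rw [hc]
  have hgood := goodB_fold t ht (conv X c) (zrowL t, 0, true) hgd0
  set stN := (conv X c).foldl (stepB t) (zrowL t, 0, true) with hstN
  have hE2 : ∀ f : List (List Int), (E2 ++ [f]).getD (((conv X c).length : Int)).toNat [] = f := by
    intro f
    rw [show (((conv X c).length : Int)).toNat = E2.length from by omega]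
    exact getD_append_head E2 f [] []
  have hg0 : pyGet3 (E2 ++ [[stN.1, tRow t stN.2.2 stN.2.1]]) ((conv X c).length : Int) 0 t
      = stN.1.getD t.toNat 0 := by
    unfold pyGet3
    rw [hE2]
    rfl
  have hg1 : pyGet3 (E2 ++ [[stN.1, tRow t stN.2.2 stN.2.1]]) ((conv X c).length : Int) 1 t
      = (tRow t stN.2.2 stN.2.1).getD t.toNat 0 := by
    unfold pyGet3
    rw [hE2]
    rfl
  rw [hg0, hg1]
  have hread : (tRow t stN.2.2 stN.2.1).getD t.toNat 0
      = if stN.2.2 && decide (stN.2.1 = t) then 1 else 0 := by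
    cases hok : stN.2.2 with
    | false =>
      simp only [tRow, Bool.false_and, if_false, Bool.false_eq_true, getD_zrow]
    | true =>
      obtain ⟨h0, h1⟩ := hgood.2 hok
      simp only [tRow, if_true, Bool.true_and]
      rw [getD_set]
      by_cases he : stN.2.1 = t
      · rw [if_pos ⟨by omega, by simp [zrowL]; omega⟩]
        simp [he]
      · rw [if_neg (by simp [zrowL]; omega), getD_zrow]
        simp [he]
  rw [hread]

-- ===== VERDICT (by name: the statement is the Claim_ definition above) =====
theorem cntLeq_spec : Claim_equal_cntLeq := by
  intro X target coins_desc _hdom hpre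
  unfold Spec_cntLeq
  exact main_equiv X target coins_desc hpre.1
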